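-- pv_equiv track=rewrite | github.com/mjarvi/AdventOfCode | 2019/test_day-04.py | has_exactly_two_adjacent_digits
-- ===== SOURCE A (Python) =====
-- def has_exactly_two_adjacent_digits(num):
--     numbers = list('{}'.format(num))
--     amount_adjacent_numbers = []
--     for a, b in zip(numbers[1:], numbers):
--         if a == b:
--             if amount_adjacent_numbers:
--                 amount_adjacent_numbers[-1] += 1
--             else:
--                 amount_adjacent_numbers.append(2)
--         else:
--             amount_adjacent_numbers.append(1)
--     return 2 in amount_adjacent_numbers
-- ===== SOURCE B (Python) =====
-- def has_exactly_two_adjacent_digits(num):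
--     s = '{}'.format(num)
--     i = 0
--     n = len(s)
--     while i < n:
--         j = i
--         while j < n and s[j] == s[i]:
--             j += 1
--         if j - i == 2:
--             return True
--         i = j
--     return False
-- ===== Notes on version B (the rewrite author's own statement) =====
-- stated objective: simpler
-- what changed: Replaces A's accumulator list of adjacent-pair counts (built by appending ones/twos and incrementing the last entry, then a membership scan) with a two-pointer run scan over the string that early-returns as soon as a run of length exactly two is found.
import Mathlib
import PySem

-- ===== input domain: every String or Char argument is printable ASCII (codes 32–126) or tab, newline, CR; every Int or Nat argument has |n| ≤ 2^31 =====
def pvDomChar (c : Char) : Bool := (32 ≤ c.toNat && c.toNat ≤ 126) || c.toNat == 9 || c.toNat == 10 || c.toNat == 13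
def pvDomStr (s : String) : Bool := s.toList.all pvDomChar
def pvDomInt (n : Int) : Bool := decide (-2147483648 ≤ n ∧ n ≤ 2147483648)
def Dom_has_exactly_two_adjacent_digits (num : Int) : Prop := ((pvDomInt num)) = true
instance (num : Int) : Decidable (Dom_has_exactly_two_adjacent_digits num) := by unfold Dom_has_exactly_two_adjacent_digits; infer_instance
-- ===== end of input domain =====

-- B replaces A's list of adjacent-pair counts (append one/two, increment the last entry, then a membership scan)
-- with a two-pointer run scan that early-returns on the first run of length exactly two (objective: simpler).

-- ===== PORT A =====
-- the loop body of A: one step over an adjacent pair (a, b) = (numbers[i+1], numbers[i])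
def pvAStep (acc : List Int) (p : Char × Char) : List Int :=
  if p.1 == p.2 then
    if acc ≠ [] then acc.dropLast ++ [acc.getLast! + 1]   -- amount_adjacent_numbers[-1] += 1
    else [2]                                              -- amount_adjacent_numbers.append(2)
  else acc ++ [1]                                         -- amount_adjacent_numbers.append(1)

def has_exactly_two_adjacent_digits (num : Int) : Bool :=
  let numbers := (PySem.Int.toStr num).toList
  (((numbers.drop 1).zip numbers).foldl pvAStep []).contains (2 : Int)

-- ===== PORT B =====
-- inner while loop of B: advance j over the run of s[i]; returns (j - i - 1, rest of the string)
def pvSplitRun (c : Char) : List Char → Nat × List Char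
  | [] => (0, [])
  | d :: t => if d == c then ((pvSplitRun c t).1 + 1, (pvSplitRun c t).2) else (0, d :: t)

-- termination measure for the outer loop (the port cites it in decreasing_by)
theorem pvSplitRun_len_le (c : Char) : ∀ t : List Char, (pvSplitRun c t).2.length ≤ t.length := by
  intro t
  induction t with
  | nil => simp [pvSplitRun]
  | cons d t ih =>
    simp only [pvSplitRun]
    split
    · exact Nat.le_succ_of_le ih
    · simp

-- outer while loop of B: take the run starting at i, test its length (j - i == 2), move i to j
def pvScanRuns : List Char → Bool
  | [] => false
  | c :: t =>
    if (pvSplitRun c t).1 + 1 == 2 then true else pvScanRuns (pvSplitRun c t).2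
termination_by l => l.length
decreasing_by
  exact Nat.lt_succ_of_le (pvSplitRun_len_le c t)

def has_exactly_two_adjacent_digits_alt (num : Int) : Bool :=
  pvScanRuns (PySem.Int.toStr num).toList

-- ===== PRECONDITION & SPEC =====
def Spec_has_exactly_two_adjacent_digits (num : Int) (out : Bool) : Prop := out = has_exactly_two_adjacent_digits_alt num
instance (num : Int) (out : Bool) : Decidable (Spec_has_exactly_two_adjacent_digits num out) := by unfold Spec_has_exactly_two_adjacent_digits; infer_instance

-- ===== CLAIM (what is proved, stated in full; the proofs are below) =====
def Claim_equal_has_exactly_two_adjacent_digits : Prop := ∀ (num : Int), Dom_has_exactly_two_adjacent_digits num → Spec_has_exactly_two_adjacent_digits num (has_exactly_two_adjacent_digits num)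

-- ===== LEMMAS AND PROOFS =====

-- the list of adjacent pairs A folds over, and A's fold
def pvPairs (l : List Char) : List (Char × Char) := (l.drop 1).zip l
def pvG (acc : List Int) (ps : List (Char × Char)) : List Int := ps.foldl pvAStep acc

theorem pvG_cons (acc : List Int) (p : Char × Char) (ps : List (Char × Char)) :
    pvG acc (p :: ps) = pvG (pvAStep acc p) ps := rfl

theorem pvPairs_cons_cons (a b : Char) (u : List Char) :
    pvPairs (a :: b :: u) = (b, a) :: pvPairs (b :: u) := by
  simp [pvPairs]

theorem pvAStep_ne_nil (acc : List Int) (p : Char × Char) (h : acc ≠ []) : pvAStep acc p ≠ [] := by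
  unfold pvAStep
  split <;> simp

-- a frozen front: once an element is not last, the fold never touches it again
theorem pvG_front (ps : List (Char × Char)) : ∀ (f s : List Int), s ≠ [] →
    pvG (f ++ s) ps = f ++ pvG s ps := by
  induction ps with
  | nil => intro f s _; rfl
  | cons p ps ih =>
    intro f s hs
    have hstep : pvAStep (f ++ s) p = f ++ pvAStep s p := by
      match s, hs with
      | a :: t, _ =>
        obtain ⟨v, hv⟩ := Option.isSome_iff_exists.mp
          (List.getLast?_isSome.mpr (List.cons_ne_nil a t))
        simp [pvAStep, hv, List.dropLast_append_of_ne_nil]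
        split <;> rfl
    rw [pvG_cons, pvG_cons, hstep, ih f _ (pvAStep_ne_nil s p hs)]

-- a run of m equal pairs just adds m to the open counter
theorem pvG_singleton_replicate (c : Char) : ∀ (m : Nat) (x : Int) (ps : List (Char × Char)),
    pvG [x] (List.replicate m (c, c) ++ ps) = pvG [x + m] ps := by
  intro m
  induction m with
  | zero => intro x ps; simp
  | succ m ih =>
    intro x ps
    have hstep : pvAStep [x] (c, c) = [x + 1] := by simp [pvAStep]
    rw [List.replicate_succ, List.cons_append, pvG_cons, hstep, ih]
    congr 2
    push_cast
    ring

theorem pvSplitRun_eq (c : Char) : ∀ t : List Char,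
    List.replicate (pvSplitRun c t).1 c ++ (pvSplitRun c t).2 = t := by
  intro t
  induction t with
  | nil => simp [pvSplitRun]
  | cons d t ih =>
    by_cases h : (d == c) = true
    · have hd : d = c := by simpa using h
      subst hd
      simp only [pvSplitRun, if_pos h, List.replicate_succ, List.cons_append, ih]
    · have h' : ¬ d = c := by simpa using h
      simp [pvSplitRun, h']

theorem pvSplitRun_head_ne (c : Char) : ∀ (t : List Char) (d : Char) (r : List Char),
    (pvSplitRun c t).2 = d :: r → (d == c) = false := by
  intro t
  induction t with
  | nil => intro d r h; simp [pvSplitRun] at h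
  | cons e t ih =>
    intro d r h
    by_cases he : (e == c) = true
    · simp only [pvSplitRun, if_pos he] at h
      exact ih d r h
    · simp only [pvSplitRun, if_neg he] at h
      obtain ⟨rfl, -⟩ := List.cons.injEq .. ▸ h
      simpa using he

-- decomposition of the adjacent-pair list along the first run: run of n+1 equal chars at the front
theorem pvPairs_run_nil (c : Char) : ∀ n : Nat,
    pvPairs (c :: List.replicate n c) = List.replicate n (c, c) := by
  intro n
  induction n with
  | zero => simp [pvPairs]
  | succ n ih =>
    rw [List.replicate_succ, pvPairs_cons_cons, ih, List.replicate_succ]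

theorem pvPairs_run_cons (c d : Char) : ∀ (n : Nat) (r : List Char),
    pvPairs (c :: (List.replicate n c ++ d :: r)) =
      List.replicate n (c, c) ++ (d, c) :: pvPairs (d :: r) := by
  intro n
  induction n with
  | zero => intro r; simp [pvPairs]
  | succ n ih =>
    intro r
    rw [List.replicate_succ, List.cons_append, pvPairs_cons_cons, ih, List.replicate_succ,
      List.cons_append]

-- with a counter already open at 1, "2 ∈ amounts" over the rest equals B's scan of the rest
theorem pvN : ∀ (k : Nat) (r : List Char), r.length ≤ k →
    (pvG [1] (pvPairs r)).contains 2 = pvScanRuns r := by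
  intro k
  induction k with
  | zero =>
    intro r hr
    match r with
    | [] => simp [pvPairs, pvG, pvScanRuns]
    | d :: r' => simp at hr
  | succ k ih =>
    intro r hr
    match r with
    | [] => simp [pvPairs, pvG, pvScanRuns]
    | d :: r' =>
      obtain ⟨m, s, hms⟩ : ∃ m s, pvSplitRun d r' = (m, s) := ⟨_, _, rfl⟩
      have hdec : r' = List.replicate m d ++ s := by
        have h := pvSplitRun_eq d r'
        rw [hms] at h
        exact h.symm
      have hslen : s.length ≤ k := by
        have h1 : s.length ≤ r'.length := by
          have h := pvSplitRun_len_le d r'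
          rw [hms] at h
          exact h
        simp only [List.length_cons] at hr
        omega
      have hscan : pvScanRuns (d :: r') = if m + 1 == 2 then true else pvScanRuns s := by
        simp only [pvScanRuns, hms]
      rw [hscan]
      conv_lhs => rw [hdec]
      match s with
      | [] =>
        rw [List.append_nil, pvPairs_run_nil, ← List.append_nil (List.replicate m (d, d)),
          pvG_singleton_replicate]
        by_cases hm : m = 1
        · subst hm; simp [pvG]
        · have h1 : ¬ (2 : Int) = 1 + m := by omega
          have h2 : (m + 1 == 2) = false := by
            simp only [beq_eq_false_iff_ne]; omega
          simp [pvG, pvScanRuns, h1, h2]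
      | e :: s' =>
        have hne : (e == d) = false := by
          apply pvSplitRun_head_ne d r' e s'
          rw [hms]
        have hstep : pvAStep [1 + (m : Int)] (e, d) = [1 + (m : Int)] ++ [1] := by
          simp [pvAStep, hne]
        rw [pvPairs_run_cons, pvG_singleton_replicate, pvG_cons, hstep,
          pvG_front _ _ _ (by simp)]
        have hkey := ih (e :: s') hslen
        by_cases hm : m = 1
        · subst hm; simp
        · have h1 : ¬ (2 : Int) = 1 + m := by omega
          have h2 : (m + 1 == 2) = false := by
            simp only [beq_eq_false_iff_ne]; omega
          simpa [h1, h2] using hkey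

-- main: A's membership test equals B's run scan on every char list
theorem pvMain (l : List Char) : (pvG [] (pvPairs l)).contains 2 = pvScanRuns l := by
  match l with
  | [] => simp [pvPairs, pvG, pvScanRuns]
  | c :: t =>
    obtain ⟨n, r, hnr⟩ : ∃ n r, pvSplitRun c t = (n, r) := ⟨_, _, rfl⟩
    have hdec : t = List.replicate n c ++ r := by
      have h := pvSplitRun_eq c t
      rw [hnr] at h
      exact h.symm
    have hscan : pvScanRuns (c :: t) = if n + 1 == 2 then true else pvScanRuns r := by
      simp only [pvScanRuns, hnr]
    rw [hscan]
    conv_lhs => rw [hdec]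
    match n, r with
    | 0, [] => simp [pvPairs, pvG, pvScanRuns]
    | 0, d :: r' =>
      have hne : (d == c) = false := by
        apply pvSplitRun_head_ne c t d r'
        rw [hnr]
      have hstep : pvAStep [] (d, c) = [] ++ [1] := by simp [pvAStep, hne]
      rw [show pvPairs (c :: (List.replicate 0 c ++ d :: r')) = (d, c) :: pvPairs (d :: r') from by
            simpa using pvPairs_run_cons c d 0 r']
      rw [pvG_cons, hstep, List.nil_append]
      have hkey := pvN (d :: r').length (d :: r') le_rfl
      simpa using hkey
    | m + 1, [] =>
      have hstep : pvAStep [] (c, c) = [2] := by simp [pvAStep]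
      rw [List.append_nil, pvPairs_run_nil, List.replicate_succ, pvG_cons, hstep,
        ← List.append_nil (List.replicate m (c, c)), pvG_singleton_replicate]
      by_cases hm : m = 0
      · subst hm; simp [pvG]
      · have h1 : ¬ (2 : Int) = 2 + m := by omega
        have h2 : (m + 1 + 1 == 2) = false := by
          simp only [beq_eq_false_iff_ne]; omega
        simp [pvG, pvScanRuns, h1, h2]
    | m + 1, d :: r' =>
      have hne : (d == c) = false := by
        apply pvSplitRun_head_ne c t d r'
        rw [hnr]
      have hstep : pvAStep [] (c, c) = [2] := by simp [pvAStep]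
      have hstep2 : pvAStep [2 + (m : Int)] (d, c) = [2 + (m : Int)] ++ [1] := by
        simp [pvAStep, hne]
      rw [pvPairs_run_cons c d (m + 1) r', List.replicate_succ, List.cons_append, pvG_cons,
        hstep, pvG_singleton_replicate, pvG_cons, hstep2, pvG_front _ _ _ (by simp)]
      have hkey := pvN (d :: r').length (d :: r') le_rfl
      by_cases hm : m = 0
      · subst hm
        simp only [Nat.cast_zero, add_zero] at *
        simp
      · have h1 : ¬ (2 : Int) = 2 + m := by omega
        have h2 : (m + 1 + 1 == 2) = false := by
          simp only [beq_eq_false_iff_ne]; omega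
        simpa [h1, h2] using hkey

-- ===== VERDICT (by name: the statement is the Claim_ definition above) =====
theorem has_exactly_two_adjacent_digits_spec : Claim_equal_has_exactly_two_adjacent_digits := by
  intro num _
  unfold Spec_has_exactly_two_adjacent_digits has_exactly_two_adjacent_digits has_exactly_two_adjacent_digits_alt
  exact pvMain (PySem.Int.toStr num).toList
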